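-- pv_equiv track=rewrite | github.com/IgorMakurov/Lab6 | main-2.py | calculate_efficiency
-- ===== SOURCE A (Python) =====
-- def calculate_efficiency(schedule):
--     efficiency = 0
--     for shift_workers in schedule:
--         for worker in shift_workers:
--             if worker[0] == 'M':
--                 efficiency += 100
--             elif worker[0] == 'W':
--                 efficiency += 75
--     return efficiency
-- ===== SOURCE B (Python) =====
-- def calculate_efficiency(schedule):
--     chars = [worker[0] for shift_workers in schedule for worker in shift_workers]
--     return 100 * chars.count('M') + 75 * chars.count('W')
-- ===== Notes on version B (the rewrite author's own statement) =====
-- stated objective: alternative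
-- what changed: B has no running accumulator at all: it first flattens the schedule into the list of first characters, then obtains each weight's multiplicity with two separate list.count scans and combines them arithmetically.
import Mathlib
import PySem

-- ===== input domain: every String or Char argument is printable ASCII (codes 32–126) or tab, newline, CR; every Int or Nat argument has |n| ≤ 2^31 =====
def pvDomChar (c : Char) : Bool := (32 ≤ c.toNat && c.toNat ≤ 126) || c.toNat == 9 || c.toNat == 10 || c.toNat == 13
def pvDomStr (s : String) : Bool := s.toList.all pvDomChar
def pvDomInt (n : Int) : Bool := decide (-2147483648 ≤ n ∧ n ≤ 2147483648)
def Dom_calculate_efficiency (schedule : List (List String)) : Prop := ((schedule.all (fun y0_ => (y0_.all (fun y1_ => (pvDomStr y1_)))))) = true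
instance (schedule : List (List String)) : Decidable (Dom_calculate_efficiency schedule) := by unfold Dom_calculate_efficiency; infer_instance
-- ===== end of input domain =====

-- B carries no running accumulator: it flattens the schedule into the list of first
-- characters, then counts each weight's multiplicity with list.count; same cost,
-- a different (staged, count-based) decomposition.

-- ===== PORT A =====
def calculate_efficiency (schedule : List (List String)) : Int :=
  schedule.foldl (fun efficiency shift_workers =>
    shift_workers.foldl (fun efficiency worker =>
      if PySem.Str.pyGet? worker 0 = some 'M' then efficiency + 100
      else if PySem.Str.pyGet? worker 0 = some 'W' then efficiency + 75
      else efficiency) efficiency) 0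

-- ===== PORT B =====
-- worker[0] raises on "" in Python (outside Pre_); here it is the option PySem.Str.pyGet?,
-- so chars is a list of options and counting compares against 'some'.
def calculate_efficiency_alt (schedule : List (List String)) : Int :=
  let chars : List (Option Char) :=
    schedule.flatMap (fun shift_workers =>
      shift_workers.map (fun worker => PySem.Str.pyGet? worker 0))
  100 * (chars.count (some 'M') : Int) + 75 * (chars.count (some 'W') : Int)

-- ===== PRECONDITION & SPEC =====
-- Pre_ excludes schedules containing an empty worker string, on which A raises IndexError.
def Pre_calculate_efficiency (schedule : List (List String)) : Prop :=
  (schedule.all (fun sw => sw.all (fun w => w ≠ ""))) = true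
instance (schedule : List (List String)) : Decidable (Pre_calculate_efficiency schedule) := by
  unfold Pre_calculate_efficiency; infer_instance
def pvWitness_calculate_efficiency : List (List String) := [["Mike", "Walt"], ["joe"]]

def Spec_calculate_efficiency (schedule : List (List String)) (out : Int) : Prop := out = calculate_efficiency_alt schedule
instance (schedule : List (List String)) (out : Int) : Decidable (Spec_calculate_efficiency schedule out) := by unfold Spec_calculate_efficiency; infer_instance

-- ===== CLAIM (what is proved, stated in full; the proofs are below) =====
def Claim_equal_calculate_efficiency : Prop := ∀ (schedule : List (List String)), Dom_calculate_efficiency schedule → Pre_calculate_efficiency schedule → Spec_calculate_efficiency schedule (calculate_efficiency schedule)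

-- ===== LEMMAS AND PROOFS =====

-- B's read-out of a list of first-character options
def pvVal (cs : List (Option Char)) : Int :=
  100 * (cs.count (some 'M') : Int) + 75 * (cs.count (some 'W') : Int)

lemma pvVal_append (a b : List (Option Char)) :
    pvVal (a ++ b) = pvVal a + pvVal b := by
  simp [pvVal, List.count_append]; ring

lemma pvVal_inner (ws : List String) (eff : Int) :
    ws.foldl (fun efficiency worker =>
      if PySem.Str.pyGet? worker 0 = some 'M' then efficiency + 100
      else if PySem.Str.pyGet? worker 0 = some 'W' then efficiency + 75
      else efficiency) eff
    = eff + pvVal (ws.map (fun worker => PySem.Str.pyGet? worker 0)) := by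
  induction ws generalizing eff with
  | nil => simp [pvVal]
  | cons w ws ih =>
    simp only [List.foldl_cons, List.map_cons, ih]
    generalize PySem.Str.pyGet? w 0 = x
    simp only [pvVal, List.count_cons]
    by_cases hM : x = some 'M'
    · subst hM; simp; ring
    · by_cases hW : x = some 'W'
      · subst hW; simp; ring
      · simp [hM, hW]

lemma pvVal_outer (ss : List (List String)) (eff : Int) :
    ss.foldl (fun efficiency shift_workers =>
      shift_workers.foldl (fun efficiency worker =>
        if PySem.Str.pyGet? worker 0 = some 'M' then efficiency + 100
        else if PySem.Str.pyGet? worker 0 = some 'W' then efficiency + 75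
        else efficiency) efficiency) eff
    = eff + pvVal (ss.flatMap (fun sw => sw.map (fun worker => PySem.Str.pyGet? worker 0))) := by
  induction ss generalizing eff with
  | nil => simp [pvVal]
  | cons s ss ih =>
    rw [List.foldl_cons, pvVal_inner, ih, List.flatMap_cons, pvVal_append]
    ring

-- ===== VERDICT (by name: the statement is the Claim_ definition above) =====
theorem calculate_efficiency_spec : Claim_equal_calculate_efficiency := by
  intro schedule _ _
  unfold Spec_calculate_efficiency calculate_efficiency calculate_efficiency_alt
  rw [pvVal_outer]
  simp [pvVal]
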